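-- pv_equiv track=rewrite | github.com/AidenWilliams/Enron-Text-and-Graph-Analysis | Task1/docProcessor.py | getParticularLink
-- ===== SOURCE A (Python) =====
-- def getParticularLink(mbxs,user):
--     links = {}
--     if user not in links:
--         links[user] = {}
--     if user in mbxs:
--         for message in mbxs[user]:
--             for to in message['tos']:
--                 if to in links[user]:
--                     links[user][to] += 1
--                 else:
--                     links[user][to] = 1
--     for sender,msgs in mbxs.items():
--         for msg in msgs:
--             if user in msg['tos']:
--                 if sender in links[user]:
--                     links[user][sender]+=1
--                 else:
--                     links[user][sender]=1
--     return links
-- ===== SOURCE B (Python) =====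
-- def getParticularLink(mbxs, user):
--     # keys-then-count: list the distinct counterparties first (in the order A
--     # first touches them), then compute each count by direct aggregation --
--     # no incremental counter dict.
--     sent = mbxs.get(user, [])
--     keys = list(dict.fromkeys(
--         [to for m in sent for to in m['tos']]
--         + [s for s, msgs in mbxs.items() if any(user in m['tos'] for m in msgs)]))
--     counts = {k: sum(m['tos'].count(k) for m in sent)
--                  + sum(1 for m in mbxs.get(k, []) if user in m['tos'])
--               for k in keys}
--     return {user: counts}
-- ===== Notes on version B (the rewrite author's own statement) =====
-- stated objective: alternative
-- what changed: Replaces A's incremental counting into a nested dict (one += per event, two separate event-producing loops) by a keys-then-count decomposition: first list the distinct counterparties with dict.fromkeys, then compute each count directly as sum of tos.count(k) over the user's messages plus the number of messages from sender k addressed to the user.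
import Mathlib
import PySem

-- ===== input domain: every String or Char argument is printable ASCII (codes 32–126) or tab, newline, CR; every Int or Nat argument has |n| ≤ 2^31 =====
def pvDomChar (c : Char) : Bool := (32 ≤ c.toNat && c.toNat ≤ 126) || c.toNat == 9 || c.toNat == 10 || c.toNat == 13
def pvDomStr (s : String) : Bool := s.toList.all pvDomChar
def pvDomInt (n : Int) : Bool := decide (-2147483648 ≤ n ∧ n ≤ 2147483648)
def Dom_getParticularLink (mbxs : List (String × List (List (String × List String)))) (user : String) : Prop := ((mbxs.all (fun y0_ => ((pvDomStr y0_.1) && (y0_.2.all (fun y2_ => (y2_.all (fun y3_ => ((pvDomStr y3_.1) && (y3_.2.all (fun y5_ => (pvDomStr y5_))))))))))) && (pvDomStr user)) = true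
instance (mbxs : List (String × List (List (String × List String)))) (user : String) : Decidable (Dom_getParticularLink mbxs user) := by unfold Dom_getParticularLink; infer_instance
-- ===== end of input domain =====

-- B replaces A's incremental nested-dict counting by a keys-then-count
-- decomposition: list the distinct counterparties first, then compute each
-- count by direct aggregation; same results, a different algorithm.

-- ===== PORT A =====
def getParticularLink (mbxs : List (String × List (List (String × List String)))) (user : String) : List (String × List (String × Int)) :=
  let links : PySem.Dict String (PySem.Dict String Int) := PySem.Dict.empty
  let links := if links.contains user then links else links.insert user PySem.Dict.empty
  let links :=
    if (PySem.Dict.mk mbxs).contains user then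
      ((PySem.Dict.mk mbxs).getD user []).foldl (fun links message =>
        ((PySem.Dict.mk message).getD "tos" []).foldl (fun links t =>
          let d := links.getD user PySem.Dict.empty
          if d.contains t then links.insert user (d.insert t (d.getD t 0 + 1))
          else links.insert user (d.insert t 1)) links) links
    else links
  let links := (PySem.Dict.mk mbxs).items.foldl
      (fun links (p : String × List (List (String × List String))) =>
        p.2.foldl (fun links msg =>
          if ((PySem.Dict.mk msg).getD "tos" []).contains user then
            let d := links.getD user PySem.Dict.empty
            if d.contains p.1 then links.insert user (d.insert p.1 (d.getD p.1 0 + 1))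
            else links.insert user (d.insert p.1 1)
          else links) links) links
  links.items.map (fun p => (p.1, p.2.items))

-- ===== PORT B =====
def getParticularLink_alt (mbxs : List (String × List (List (String × List String)))) (user : String) : List (String × List (String × Int)) :=
  let sent := (PySem.Dict.mk mbxs).getD user []
  -- keys = list(dict.fromkeys(outgoing recipients + qualifying senders))
  let keys := PySem.List.dedup
      (sent.flatMap (fun m => (PySem.Dict.mk m).getD "tos" []) ++
       ((PySem.Dict.mk mbxs).items.filter
          (fun p => p.2.any (fun m => ((PySem.Dict.mk m).getD "tos" []).contains user))).map (fun p => p.1))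
  -- {k: sum(m['tos'].count(k) for m in sent) + sum(1 for m in mbxs.get(k,[]) if user in m['tos']) for k in keys}
  [(user,
    keys.map (fun k =>
      (k, (sent.map (fun m => ((((PySem.Dict.mk m).getD "tos" []).count k : Nat) : Int))).sum
          + (((((PySem.Dict.mk mbxs).getD k []).filter
                (fun m => ((PySem.Dict.mk m).getD "tos" []).contains user)).length : Nat) : Int))))]

-- ===== PRECONDITION & SPEC =====
-- Pre_ excludes inputs on which Python A raises KeyError (a message dict lacking the
-- 'tos' key), and association lists whose sender keys are not pairwise distinct,
-- which represent no Python dict (Python's mbxs is a dict and cannot have them).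
def Pre_getParticularLink (mbxs : List (String × List (List (String × List String)))) (user : String) : Prop :=
  (∀ p ∈ mbxs, ∀ m ∈ p.2, (PySem.Dict.mk m).contains "tos" = true) ∧ (mbxs.map Prod.fst).Nodup
instance (mbxs : List (String × List (List (String × List String)))) (user : String) : Decidable (Pre_getParticularLink mbxs user) := by unfold Pre_getParticularLink; infer_instance
def pvWitness_getParticularLink : (List (String × List (List (String × List String)))) × String :=
  ([("a", [[("tos", ["b", "a"])]]), ("b", [[("tos", ["a"])]])], "a")

def Spec_getParticularLink (mbxs : List (String × List (List (String × List String)))) (user : String) (out : List (String × List (String × Int))) : Prop := out = getParticularLink_alt mbxs user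
instance (mbxs : List (String × List (List (String × List String)))) (user : String) (out : List (String × List (String × Int))) : Decidable (Spec_getParticularLink mbxs user out) := by unfold Spec_getParticularLink; infer_instance

-- ===== CLAIM (what is proved, stated in full; the proofs are below) =====
def Claim_equal_getParticularLink : Prop := ∀ (mbxs : List (String × List (List (String × List String)))) (user : String), Dom_getParticularLink mbxs user → Pre_getParticularLink mbxs user → Spec_getParticularLink mbxs user (getParticularLink mbxs user)

-- ===== LEMMAS AND PROOFS =====

-- the qualifying-message test ('user in msg["tos"]')
def gplQ (user : String) (m : List (String × List String)) : Bool :=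
  ((PySem.Dict.mk m).getD "tos" []).contains user

-- the event stream A's counting is equivalent to: outgoing recipients, then
-- one sender per qualifying message
def gplOut (mbxs : List (String × List (List (String × List String)))) (user : String) : List String :=
  ((PySem.Dict.mk mbxs).getD user []).flatMap (fun m => (PySem.Dict.mk m).getD "tos" [])
def gplInc (mbxs : List (String × List (List (String × List String)))) (user : String) : List String :=
  (PySem.Dict.mk mbxs).items.flatMap (fun p => (p.2.filter (gplQ user)).map (fun _ => p.1))

-- A's branchy in-place step on links[user], and the plain counter step
def gplStepB (d : PySem.Dict String Int) (k : String) : PySem.Dict String Int :=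
  d.insert k (d.getD k 0 + 1)
def gplStepA (user : String) (links : PySem.Dict String (PySem.Dict String Int)) (k : String) : PySem.Dict String (PySem.Dict String Int) :=
  let d := links.getD user PySem.Dict.empty
  if d.contains k then links.insert user (d.insert k (d.getD k 0 + 1))
  else links.insert user (d.insert k 1)

theorem gplStepA_single (user k : String) (d : PySem.Dict String Int) :
    gplStepA user (PySem.Dict.mk [(user, d)]) k = PySem.Dict.mk [(user, gplStepB d k)] := by
  have hbranch : (if d.contains k then d.insert k (d.getD k 0 + 1) else d.insert k 1) = gplStepB d k := by
    cases h : d.contains k with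
    | true => simp [gplStepB]
    | false => simp [gplStepB, PySem.Dict.getD_of_not_contains d 0 h]
  show (if (PySem.Dict.mk [(user, d)]).getD user PySem.Dict.empty |>.contains k then _ else _) = _
  have hg : (PySem.Dict.mk [(user, d)]).getD user PySem.Dict.empty = d := by
    simp [PySem.Dict.getD_eq_get?_getD, PySem.Dict.get?_mk_cons]
  have hins : ∀ v : PySem.Dict String Int,
      (PySem.Dict.mk [(user, d)]).insert user v = PySem.Dict.mk [(user, v)] := by
    intro v
    apply PySem.Dict.ext
    rw [PySem.Dict.items_insert_of_contains]
    · simp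
    · simp [PySem.Dict.contains_mk]
  rw [← hbranch, hg]
  cases h : d.contains k <;> simp [hins]

theorem gpl_fold1 (user : String) (l : List String) (d : PySem.Dict String Int) :
    l.foldl (gplStepA user) (PySem.Dict.mk [(user, d)])
      = PySem.Dict.mk [(user, l.foldl gplStepB d)] := by
  induction l generalizing d with
  | nil => rfl
  | cons x xs ih => simp [List.foldl_cons, gplStepA_single, ih]

theorem gpl_fold2 {M : Type} (user : String) (g : M → List String) (msgs : List M) (d : PySem.Dict String Int) :
    msgs.foldl (fun links m => (g m).foldl (gplStepA user) links) (PySem.Dict.mk [(user, d)])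
      = PySem.Dict.mk [(user, msgs.foldl (fun d m => (g m).foldl gplStepB d) d)] := by
  induction msgs generalizing d with
  | nil => rfl
  | cons x xs ih => simp [List.foldl_cons, gpl_fold1, ih]

theorem gpl_fold3 {M : Type} (user k : String) (c : M → Bool) (msgs : List M) (d : PySem.Dict String Int) :
    msgs.foldl (fun links m => if c m then gplStepA user links k else links) (PySem.Dict.mk [(user, d)])
      = PySem.Dict.mk [(user, msgs.foldl (fun d m => if c m then gplStepB d k else d) d)] := by
  induction msgs generalizing d with
  | nil => rfl
  | cons x xs ih =>
    cases h : c x <;> simp [List.foldl_cons, h, gplStepA_single, ih]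

theorem gpl_fold4 {P M : Type} (user : String) (key : P → String) (ms : P → List M) (c : M → Bool)
    (items : List P) (d : PySem.Dict String Int) :
    items.foldl (fun links p => (ms p).foldl (fun links m => if c m then gplStepA user links (key p) else links) links) (PySem.Dict.mk [(user, d)])
      = PySem.Dict.mk [(user, items.foldl (fun d p => (ms p).foldl (fun d m => if c m then gplStepB d (key p) else d) d) d)] := by
  induction items generalizing d with
  | nil => rfl
  | cons x xs ih => simp [List.foldl_cons, gpl_fold3, ih]

theorem gpl_foldl_flatMap {A B S : Type} (g : A -> List B) (f : S -> B -> S) (l : List A) (s : S) :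
    (l.flatMap g).foldl f s = l.foldl (fun s a => (g a).foldl f s) s := by
  induction l generalizing s with
  | nil => rfl
  | cons x xs ih => simp [List.flatMap_cons, List.foldl_append, ih]

theorem gpl_foldl_filter_map_const {M S K : Type} (c : M → Bool) (k : K) (f : S → K → S) (msgs : List M) (s : S) :
    ((msgs.filter c).map (fun _ => k)).foldl f s = msgs.foldl (fun s m => if c m then f s k else s) s := by
  induction msgs generalizing s with
  | nil => rfl
  | cons x xs ih =>
    cases h : c x with
    | true => simp only [List.filter_cons, h, if_pos, List.map_cons, List.foldl_cons]; exact ih _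
    | false => simp only [List.filter_cons, h, List.foldl_cons, Bool.false_eq_true, if_false]; exact ih s

-- A's whole computation is the counter of the event stream, under the key 'user'
theorem gpl_A_eq_counter (mbxs : List (String × List (List (String × List String)))) (user : String) :
    getParticularLink mbxs user
      = [(user, (PySem.Dict.counter (gplOut mbxs user ++ gplInc mbxs user)).items)] := by
  rw [← PySem.Dict.foldl_insert_getD_add_one_eq_counter]
  show (((PySem.Dict.mk mbxs).items.foldl
      (fun (links : PySem.Dict String (PySem.Dict String Int)) (p : String × List (List (String × List String))) =>
        p.2.foldl (fun links msg =>
          if gplQ user msg then gplStepA user links p.1 else links) links)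
      (if (PySem.Dict.mk mbxs).contains user then
        ((PySem.Dict.mk mbxs).getD user []).foldl
          (fun links m => ((PySem.Dict.mk m).getD "tos" []).foldl (gplStepA user) links)
          (if (PySem.Dict.empty : PySem.Dict String (PySem.Dict String Int)).contains user then PySem.Dict.empty
           else PySem.Dict.empty.insert user PySem.Dict.empty)
       else (if (PySem.Dict.empty : PySem.Dict String (PySem.Dict String Int)).contains user then PySem.Dict.empty
             else PySem.Dict.empty.insert user PySem.Dict.empty))).items.map (fun p => (p.1, p.2.items)))
    = [(user, ((gplOut mbxs user ++ gplInc mbxs user).foldl gplStepB PySem.Dict.empty).items)]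
  have h0 : (if (PySem.Dict.empty : PySem.Dict String (PySem.Dict String Int)).contains user then PySem.Dict.empty
             else PySem.Dict.empty.insert user (PySem.Dict.empty : PySem.Dict String Int))
      = PySem.Dict.mk [(user, (PySem.Dict.empty : PySem.Dict String Int))] := by
    simp [PySem.Dict.contains_empty]
    rfl
  rw [h0, List.foldl_append]
  unfold gplOut gplInc
  rw [gpl_foldl_flatMap, gpl_foldl_flatMap]
  simp only [gpl_foldl_filter_map_const]
  cases hc : (PySem.Dict.mk mbxs).contains user with
  | true =>
    rw [if_pos rfl, gpl_fold2, gpl_fold4]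
    rfl
  | false =>
    simp only [Bool.false_eq_true, if_false]
    rw [gpl_fold4, PySem.Dict.getD_of_not_contains _ _ hc]
    rfl

-- updating a set with a constant list adds the element once (or not at all)
theorem gpl_update_map_const {α : Type} {β : Type} [BEq α] [LawfulBEq α] (s : PySem.Set α) (l : List β) (x : α) :
    PySem.Set.update s (l.map (fun _ => x)) = if l.isEmpty then s else PySem.Set.add s x := by
  induction l generalizing s with
  | nil => rfl
  | cons y ys ih =>
    simp only [List.map_cons, PySem.Set.update_cons, ih, List.isEmpty_cons]
    cases h : ys.isEmpty with
    | true => simp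
    | false =>
      simp only [Bool.false_eq_true, if_false]
      rw [PySem.Set.add_of_mem ((PySem.Set.mem_add _ _ _).2 (Or.inr rfl))]

-- deduplicating the repeated-sender stream gives the once-per-qualifying-sender keys
theorem gpl_update_inc {P : Type} (key : P → String) (ms : P → List (List (String × List String)))
    (qq : List (String × List String) → Bool) (items : List P) (s : PySem.Set String) :
    PySem.Set.update s (items.flatMap (fun p => ((ms p).filter qq).map (fun _ => key p)))
      = PySem.Set.update s ((items.filter (fun p => (ms p).any qq)).map key) := by
  induction items generalizing s with
  | nil => rfl
  | cons p ps ih =>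
    rw [List.flatMap_cons, PySem.Set.update_append, gpl_update_map_const]
    cases h : (ms p).any qq with
    | true =>
      have hne : ((ms p).filter qq).isEmpty = false := by
        rcases List.any_eq_true.1 h with ⟨a, ha, hq⟩
        simp [List.isEmpty_eq_false_iff, List.filter_eq_nil_iff]
        exact ⟨a, ha, hq⟩
      rw [hne]
      simp only [Bool.false_eq_true, if_false, List.filter_cons, h, if_pos, List.map_cons,
        PySem.Set.update_cons]
      exact ih _
    | false =>
      have he : ((ms p).filter qq).isEmpty = true := by
        simp only [List.isEmpty_iff, List.filter_eq_nil_iff]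
        intro a ha
        simp [List.any_eq_false.1 h a ha]
      rw [he, if_pos rfl]
      simp only [List.filter_cons, h, Bool.false_eq_true, if_false]
      exact ih s

-- count of an element over a flatMap is the sum of the per-block counts
theorem gpl_count_flatMap {A B : Type} [BEq B] (g : A → List B) (l : List A) (k : B) :
    ((l.flatMap g).count k) = (l.map (fun a => (g a).count k)).sum := by
  induction l with
  | nil => rfl
  | cons x xs ih => simp [List.flatMap_cons, List.count_append, ih]

-- count of an element in a constant list
theorem gpl_count_map_const {A B : Type} [DecidableEq B] (l : List A) (x k : B) :
    ((l.map (fun _ => x)).count k) = if x = k then l.length else 0 := by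
  induction l with
  | nil => simp
  | cons y ys ih =>
    rw [List.map_cons, List.count_cons, ih]
    by_cases h : x = k
    · simp [h]
    · simp [h]

-- a keyed sum over an association list with distinct keys collapses to the first match
theorem gpl_sum_keyed (q : List (String × List String) → Bool) (k : String)
    (mbxs : List (String × List (List (String × List String))))
    (hnd : (mbxs.map Prod.fst).Nodup) :
    (mbxs.map (fun p => if p.1 = k then ((p.2.filter q).length : Nat) else 0)).sum
      = (((PySem.Dict.mk mbxs).getD k []).filter q).length := by
  induction mbxs with
  | nil => simp [PySem.Dict.getD_eq_get?_getD]; rfl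
  | cons p ps ih =>
    have hnd' : (ps.map Prod.fst).Nodup := (List.nodup_cons.1 hnd).2
    have hget : (PySem.Dict.mk (p :: ps)).getD k []
        = if p.1 == k then p.2 else (PySem.Dict.mk ps).getD k [] := by
      rw [PySem.Dict.getD_eq_get?_getD, PySem.Dict.get?_mk_cons]
      cases h : p.1 == k with
      | true => simp
      | false => simp [PySem.Dict.getD_eq_get?_getD]
    by_cases h : p.1 = k
    · subst h
      have hzero : (ps.map (fun p' => if p'.1 = p.1 then ((p'.2.filter q).length : Nat) else 0)).sum = 0 := by
        apply List.sum_eq_zero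
        intro n hn
        rcases List.mem_map.1 hn with ⟨p', hp', rfl⟩
        have : p'.1 ≠ p.1 := by
          intro he
          exact (List.nodup_cons.1 hnd).1 (he ▸ List.mem_map_of_mem hp')
        simp [this]
      simp [hget, hzero]
    · simp [hget, h, ih hnd']

-- ===== VERDICT (by name: the statement is the Claim_ definition above) =====
theorem getParticularLink_spec : Claim_equal_getParticularLink := by
  intro mbxs user _ hpre
  show getParticularLink mbxs user = getParticularLink_alt mbxs user
  rw [gpl_A_eq_counter]
  show _ = [(user,
    (PySem.List.dedup
      (gplOut mbxs user ++
       ((PySem.Dict.mk mbxs).items.filter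
          (fun p => p.2.any (gplQ user))).map (fun p => p.1))).map (fun k =>
      (k, (((PySem.Dict.mk mbxs).getD user []).map (fun m => ((((PySem.Dict.mk m).getD "tos" []).count k : Nat) : Int))).sum
          + (((((PySem.Dict.mk mbxs).getD k []).filter (gplQ user)).length : Nat) : Int))))]
  rw [PySem.Dict.items_counter]
  have hkeys : PySem.Set.ofList (gplOut mbxs user ++ gplInc mbxs user)
      = PySem.List.dedup (gplOut mbxs user ++
          ((PySem.Dict.mk mbxs).items.filter (fun p => p.2.any (gplQ user))).map (fun p => p.1)) := by
    rw [PySem.List.dedup_eq_ofList, PySem.Set.ofList_append, PySem.Set.ofList_append]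
    exact gpl_update_inc Prod.fst Prod.snd (gplQ user) _ _
  rw [← hkeys]
  apply congrArg (fun l => [(user, l)])
  apply List.map_congr_left
  intro k hk
  refine congrArg (fun v => (k, v)) ?_
  rw [List.count_append]
  push_cast
  congr 1
  · unfold gplOut
    rw [gpl_count_flatMap, Nat.cast_list_sum, List.map_map]
    rfl
  · unfold gplInc
    rw [gpl_count_flatMap]
    have : ((PySem.Dict.mk mbxs).items.map
        (fun p => ((p.2.filter (gplQ user)).map (fun _ => p.1)).count k))
        = ((PySem.Dict.mk mbxs).items.map (fun p => if p.1 = k then ((p.2.filter (gplQ user)).length : Nat) else 0)) := by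
      apply List.map_congr_left
      intro p _
      rw [gpl_count_map_const]
    rw [this]
    rw [gpl_sum_keyed (gplQ user) k mbxs hpre.2]
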